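-- pv_equiv track=rewrite | github.com/fh-vh/kattis_problems | detailed_differences/detailed_differences.py | show_differences
-- ===== SOURCE A (Python) =====
-- def show_differences(sample):
-- 	lb = '\n'
-- 	tmp = []
-- 	for i in sample:
-- 		x = i.replace("\n","")
-- 		tmp.append(x.replace("\r",""))
-- 	tmp = tmp[1:]
--
-- 	def comparer(string1,string2):
-- 		tmp = ''
-- 		for i in range(0,len(string1)):
-- 			if string1[i] == string2[i]:
-- 				tmp = tmp + '.'
-- 			else:
-- 				tmp = tmp + '*'
-- 		return tmp
--
-- 	def output_builder(input_list):
-- 		if not input_list: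
-- 			return ''
-- 		elif len(input_list) == 2:
-- 			tmp = comparer(input_list[0],input_list[1])
-- 			return input_list[0] + lb + input_list[1] + lb + tmp + lb
-- 		else:
-- 			tmp = comparer(input_list[0],input_list[1])
-- 			return input_list[0] + lb + input_list[1] + lb + tmp + 2*lb + output_builder(input_list[2:])
--
-- 	output = output_builder(tmp)
-- 	return output
-- ===== SOURCE B (Python) =====
-- def show_differences(sample):
--     lst = [s.replace("\n", "").replace("\r", "") for s in sample][1:]
--     blocks = []
--     for i in range(0, len(lst), 2):
--         first, second = lst[i], lst[i + 1]
--         diff = ''.join('.' if first[j] == second[j] else '*' for j in range(len(first)))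
--         blocks.append(first + '\n' + second + '\n' + diff)
--     return '\n\n'.join(blocks) + '\n' if blocks else ''
-- ===== Notes on version B (the rewrite author's own statement) =====
-- stated objective: faster
-- what changed: A's slice-based two-at-a-time recursion, which re-concatenates the entire remaining output onto each block, is replaced by a flat index loop stepping by 2 that collects the blocks into a list and joins them once at the end.
import Mathlib
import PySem

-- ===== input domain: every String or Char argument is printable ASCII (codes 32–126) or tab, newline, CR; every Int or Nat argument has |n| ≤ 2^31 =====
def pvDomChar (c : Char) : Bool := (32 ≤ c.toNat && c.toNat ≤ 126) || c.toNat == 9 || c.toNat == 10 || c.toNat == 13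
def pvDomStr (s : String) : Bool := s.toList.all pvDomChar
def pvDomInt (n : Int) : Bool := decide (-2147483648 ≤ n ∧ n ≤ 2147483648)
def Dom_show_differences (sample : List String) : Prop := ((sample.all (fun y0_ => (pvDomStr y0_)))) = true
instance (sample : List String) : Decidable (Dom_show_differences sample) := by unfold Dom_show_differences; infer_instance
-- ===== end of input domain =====

-- B replaces A's two-at-a-time slice recursion, which re-concatenates the whole remaining output
-- onto each block, by a flat index loop stepping by 2 that collects the blocks in a list and joins
-- them once at the end (objective: faster).

-- ===== PORT A =====
-- i.replace("\n","").replace("\r","")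
def pvStrip (s : String) : String :=
  PySem.Str.replace (PySem.Str.replace s "\n" "") "\r" ""

-- comparer(string1, string2): loop over range(0, len(string1)), appending '.' or '*'.
-- Python raises IndexError when len(string2) < len(string1) (excluded by Pre_); there
-- pyGet? returns none and the port compares none = none.
def pvComparer (s1 s2 : String) : String :=
  (PySem.List.pyRange 0 (PySem.Str.len s1)).foldl
    (fun t i => t ++ (if PySem.Str.pyGet? s1 i = PySem.Str.pyGet? s2 i then "." else "*")) ""

-- output_builder(input_list): the slice-based recursion of A.
-- On a one-element list Python raises IndexError (excluded by Pre_); the port returns "" there.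
def pvOutputBuilder : List String → String
  | [] => ""
  | [_] => ""
  | [a, b] => a ++ "\n" ++ b ++ "\n" ++ pvComparer a b ++ "\n"
  | a :: b :: c :: rest =>
      a ++ "\n" ++ b ++ "\n" ++ pvComparer a b ++ "\n" ++ "\n" ++ pvOutputBuilder (c :: rest)

def show_differences (sample : List String) : String :=
  pvOutputBuilder ((sample.map pvStrip).drop 1)

-- ===== PORT B =====
-- first + '\n' + second + '\n' + ''.join('.' if first[j] == second[j] else '*' for j in range(len(first)))
-- first[j]/second[j] via pyGet?; Python raises IndexError when second is shorter (excluded by Pre_).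
def altBlock (a b : String) : String :=
  a ++ "\n" ++ b ++ "\n" ++
    String.ofList ((List.range a.toList.length).map
      (fun (j : Nat) => if PySem.Str.pyGet? a (j : Int) = PySem.Str.pyGet? b (j : Int) then '.' else '*'))

def show_differences_alt (sample : List String) : String :=
  let lst := (sample.map pvStrip).drop 1
  -- for i in range(0, len(lst), 2): blocks.append(block of lst[i], lst[i+1]).
  -- lst[i+1] via pyGet?; on odd length Python raises IndexError (excluded by Pre_), getD "" there.
  let blocks := (PySem.List.pyRange 0 (lst.length : Int) 2).foldl
      (fun bs i => bs ++ [altBlock ((PySem.List.pyGet? lst i).getD "")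
                                   ((PySem.List.pyGet? lst (i + 1)).getD "")]) []
  if blocks.isEmpty then "" else PySem.Str.join "\n\n" blocks ++ "\n"

-- ===== PRECONDITION & SPEC =====
-- Pre_ excludes exactly the inputs on which the Python (both A and B) raises IndexError: an odd
-- number of lines after dropping the first, or a pair whose first line is longer than its second.
def Pre_show_differences (sample : List String) : Prop :=
  let lst := (sample.map pvStrip).drop 1
  lst.length % 2 = 0 ∧
  ∀ i ∈ List.range (lst.length / 2),
    (lst.getD (2 * i) "").toList.length ≤ (lst.getD (2 * i + 1) "").toList.length
instance (sample : List String) : Decidable (Pre_show_differences sample) := by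
  unfold Pre_show_differences; infer_instance

def pvWitness_show_differences : List String := ["x", "ab", "cd"]

def Spec_show_differences (sample : List String) (out : String) : Prop := out = show_differences_alt sample
instance (sample : List String) (out : String) : Decidable (Spec_show_differences sample out) := by unfold Spec_show_differences; infer_instance

-- ===== CLAIM (what is proved, stated in full; the proofs are below) =====
def Claim_equal_show_differences : Prop := ∀ (sample : List String), Dom_show_differences sample → Pre_show_differences sample → Spec_show_differences sample (show_differences sample)

-- ===== LEMMAS AND PROOFS =====

-- the list of blocks B's loop collects, written pairwise (proof-side helper)
def blocksOf : List String → List String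
  | a :: b :: rest => altBlock a b :: blocksOf rest
  | _ => []

lemma foldl_push {α β : Type} (f : α → β) :
    ∀ (l : List α) (init : List β),
      l.foldl (fun bs i => bs ++ [f i]) init = init ++ l.map f := by
  intro l
  induction l with
  | nil => simp
  | cons a t ih => intro init; simp [List.foldl, ih]

-- B's stepped range of indices, as a List.range of pair numbers (even length)
lemma pyRange_two (k : Nat) :
    PySem.List.pyRange 0 ((2 * k : Nat) : Int) 2
      = (List.range k).map (fun j => ((2 * j : Nat) : Int)) := by
  rw [PySem.List.pyRange_of_pos _ _ (by norm_num)]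
  rcases Nat.eq_zero_or_pos k with hk | hk
  · subst hk; simp
  · have hlt : (0 : Int) < ((2 * k : Nat) : Int) := by push_cast; omega
    rw [if_pos hlt]
    have : ((((2 * k : Nat) : Int) - 0 + 2 - 1) / 2).toNat = k := by
      push_cast; omega
    rw [this]
    apply List.map_congr_left
    intro j _
    push_cast; ring

-- toList of A's comparer fold (proof-side)
lemma cmp_fold (s1 s2 : String) : ∀ (n : Nat) (init : String),
    ((PySem.List.pyRange 0 (n:Int)).foldl
      (fun t i => t ++ (if PySem.Str.pyGet? s1 i = PySem.Str.pyGet? s2 i then "." else "*")) init).toList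
    = init.toList ++ (List.range n).map (fun k => if s1.toList[k]? = s2.toList[k]? then '.' else '*') := by
  intro n
  induction n with
  | zero => intro init; simp [PySem.List.pyRange]
  | succ m ih =>
      intro init
      rw [show ((m+1 : Nat) : Int) = (m : Int) + 1 by push_cast; ring,
          PySem.List.pyRange_one_succ_right (by positivity), List.foldl_append,
          List.foldl_cons, List.foldl_nil, String.toList_append, ih init,
          List.range_succ, List.map_append, List.append_assoc]
      congr 1
      have h1 : PySem.Str.pyGet? s1 ((m : Nat) : Int) = s1.toList[m]? := PySem.Str.pyGet?_natCast s1 m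
      have h2 : PySem.Str.pyGet? s2 ((m : Nat) : Int) = s2.toList[m]? := PySem.Str.pyGet?_natCast s2 m
      rw [h1, h2]
      split <;> simp_all

-- the comparer of A equals B's per-block diff string
lemma comparer_eq (a b : String) :
    pvComparer a b
      = String.ofList ((List.range a.toList.length).map
          (fun (j : Nat) => if PySem.Str.pyGet? a (j : Int) = PySem.Str.pyGet? b (j : Int) then '.' else '*')) := by
  apply String.toList_inj.mp
  unfold pvComparer
  rw [PySem.Str.len_eq, cmp_fold a b a.toList.length ""]
  rw [show ("" : String).toList = [] by simp, List.nil_append, String.toList_ofList]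
  apply List.map_congr_left
  intro j _
  rw [PySem.Str.pyGet?_natCast, PySem.Str.pyGet?_natCast]

-- B's fold collects exactly blocksOf (even length)
lemma fold_blocks : ∀ (l : List String), l.length % 2 = 0 →
    (PySem.List.pyRange 0 (l.length : Int) 2).foldl
      (fun bs i => bs ++ [altBlock ((PySem.List.pyGet? l i).getD "")
                                   ((PySem.List.pyGet? l (i + 1)).getD "")]) []
      = blocksOf l := by
  have key : ∀ (l : List String), l.length % 2 = 0 →
      (List.range (l.length / 2)).map
        (fun j => altBlock (l.getD (2 * j) "") (l.getD (2 * j + 1) "")) = blocksOf l := by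
    intro l
    induction l using blocksOf.induct with
    | case1 a b rest ih =>
        intro he
        have he' : rest.length % 2 = 0 := by simp [List.length_cons] at he; omega
        have hlen : (a :: b :: rest).length / 2 = rest.length / 2 + 1 := by
          simp [List.length_cons]; omega
        rw [hlen, List.range_succ_eq_map, List.map_cons, List.map_map]
        simp only [blocksOf]
        congr 1
        rw [← ih he']
        apply List.map_congr_left
        intro j _
        simp [Function.comp, show 2 * (j + 1) = (2 * j + 1) + 1 by ring]
    | case2 l h2 =>
        intro he
        match l, h2 with
        | [], _ => simp [blocksOf]
        | [a], _ => simp at he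
        | a :: b :: r, h2 => exact absurd rfl (h2 a b r)
  intro l he
  obtain ⟨k, hk⟩ : ∃ k, l.length = 2 * k := ⟨l.length / 2, by omega⟩
  rw [foldl_push, List.nil_append,
      show (l.length : Int) = ((2 * k : Nat) : Int) by rw [hk],
      pyRange_two, List.map_map, ← key l he,
      show l.length / 2 = k by omega]
  apply List.map_congr_left
  intro j hj
  have hj' : j < k := List.mem_range.mp hj
  have hb1 : 2 * j < l.length := by omega
  have hb2 : 2 * j + 1 < l.length := by omega
  have h1 : PySem.List.pyGet? l (2 * (j : Int)) = l[2 * j]? := by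
    rw [show (2 * (j : Int)) = ((2 * j : Nat) : Int) by push_cast; ring]
    exact PySem.List.pyGet?_natCast l (2 * j)
  have h2 : PySem.List.pyGet? l (2 * (j : Int) + 1) = l[2 * j + 1]? := by
    rw [show (2 * (j : Int) + 1) = ((2 * j + 1 : Nat) : Int) by push_cast; ring]
    exact PySem.List.pyGet?_natCast l (2 * j + 1)
  simp [Function.comp, h1, h2, List.getElem?_eq_getElem hb1, List.getElem?_eq_getElem hb2,
    List.getD_eq_getElem?_getD]

-- A's recursion equals the joined block list (even length)
lemma builder_eq : ∀ (l : List String), l.length % 2 = 0 →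
    pvOutputBuilder l = (if (blocksOf l).isEmpty then "" else PySem.Str.join "\n\n" (blocksOf l) ++ "\n") := by
  intro l
  induction l using blocksOf.induct with
  | case1 a b rest ih =>
      intro he
      have he' : rest.length % 2 = 0 := by simp [List.length_cons] at he; omega
      match rest, ih with
      | [], _ =>
          apply String.toList_inj.mp
          simp [pvOutputBuilder, blocksOf, PySem.Str.toList_join, PySem.Chars.join_singleton,
            altBlock, comparer_eq a b]
      | [c], _ => simp at he'
      | c :: d :: r, ih =>
          have hrec := ih he'
          have hne : (blocksOf (c :: d :: r)).isEmpty = false := by simp [blocksOf]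
          rw [hne] at hrec
          apply String.toList_inj.mp
          rw [show pvOutputBuilder (a :: b :: c :: d :: r)
                = a ++ "\n" ++ b ++ "\n" ++ pvComparer a b ++ "\n" ++ "\n" ++ pvOutputBuilder (c :: d :: r) from rfl]
          simp only [blocksOf, List.isEmpty_cons, if_neg, Bool.false_eq_true, not_false_iff,
            String.toList_append, PySem.Str.toList_join, List.map_cons,
            PySem.Chars.join_cons_cons]
          rw [hrec]
          simp [String.toList_append, PySem.Str.toList_join, comparer_eq a b, altBlock,
            List.append_assoc, blocksOf]
  | case2 l h2 =>
      intro he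
      match l, h2 with
      | [], _ => simp [pvOutputBuilder, blocksOf]
      | [a], _ => simp at he
      | a :: b :: r, h2 => exact absurd rfl (h2 a b r)

-- ===== VERDICT (by name: the statement is the Claim_ definition above) =====
theorem show_differences_spec : Claim_equal_show_differences := by
  intro sample _ hpre
  unfold Spec_show_differences show_differences show_differences_alt
  obtain ⟨he, _⟩ := hpre
  dsimp only
  rw [fold_blocks _ he]
  exact builder_eq _ he
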